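-- pv_equiv track=rewrite | github.com/ashoklive23/AI-Resume-Screener_Ashok | skills_analyzer.py | _format_skill_name
-- ===== SOURCE A (Python) =====
-- def _format_skill_name(keyword):
--     """Format skill name for display"""
--     # Capitalize first letter of each word
--     words = keyword.split()
--     formatted = ' '.join(word.capitalize() for word in words)
--
--     # Special cases
--     replacements = {
--         'Sap': 'SAP',
--         'Erp': 'ERP',
--         'Rfp': 'RFP',
--         'Rfq': 'RFQ',
--         'Rfi': 'RFI',
--         'Qa': 'QA',
--         'Qc': 'QC',
--         'Jit': 'JIT',
--         'Tco': 'TCO',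
--         'P2p': 'P2P',
--         'S2p': 'S2P'
--     }
--
--     for old, new in replacements.items():
--         formatted = formatted.replace(old, new)
--
--     return formatted
-- ===== SOURCE B (Python) =====
-- # Per-word formatting: capitalize each word and expand a known abbreviation when the
-- # word starts with one; one pass over the words instead of repeated full-string scans.
--
-- _ABBREVIATIONS = [
--     ('Sap', 'SAP'), ('Erp', 'ERP'), ('Rfp', 'RFP'), ('Rfq', 'RFQ'), ('Rfi', 'RFI'),
--     ('Qa', 'QA'), ('Qc', 'QC'), ('Jit', 'JIT'), ('Tco', 'TCO'), ('P2p', 'P2P'), ('S2p', 'S2P'),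
-- ]
--
--
-- def _format_word(word):
--     w = word.capitalize()
--     for key, abbr in _ABBREVIATIONS:
--         if w.startswith(key):
--             return abbr + w[len(key):]
--     return w
--
--
-- def _format_skill_name(keyword):
--     """Format skill name for display"""
--     return ' '.join(_format_word(word) for word in keyword.split())
-- ===== Notes on version B (the rewrite author's own statement) =====
-- stated objective: alternative
-- what changed: Instead of capitalizing and then running eleven sequential full-string str.replace passes, B formats each word independently: capitalize it and, if it starts with a known abbreviation, expand that abbreviation once.
-- intended difference: On keywords containing a word whose lowercase form starts with sap2p/erp2p/rfp2p/rfqa/rfqc/jitco, A's later replace passes re-match across the freshly uppercased abbreviation (e.g. 'jitco' -> 'JITCO'), an accident of running the replaces sequentially; B applies one abbreviation per word ('JITco'), which is the intended formatting. — e.g. on _format_skill_name("jitco"): A returns "JITCO", B returns "JITco"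
import Mathlib
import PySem

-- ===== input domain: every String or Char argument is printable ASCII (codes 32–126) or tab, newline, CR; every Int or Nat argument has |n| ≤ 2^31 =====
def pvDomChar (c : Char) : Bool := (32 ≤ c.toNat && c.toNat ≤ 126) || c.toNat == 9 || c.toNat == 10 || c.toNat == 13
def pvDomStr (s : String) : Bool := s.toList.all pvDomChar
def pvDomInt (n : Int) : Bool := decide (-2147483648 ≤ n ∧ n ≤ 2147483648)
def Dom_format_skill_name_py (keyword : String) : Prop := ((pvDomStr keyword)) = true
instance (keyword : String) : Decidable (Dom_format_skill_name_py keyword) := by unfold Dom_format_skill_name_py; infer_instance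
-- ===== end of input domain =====

-- B formats each word independently (capitalize, expand a leading abbreviation once)
-- instead of A's eleven sequential full-string replace passes; objective: alternative.

-- ===== PORT A =====
-- word.capitalize(): first char title-cased (= uppercased on ASCII), rest lowercased;
-- hand-ported (PySem has no capitalize); exact on the ASCII domain
def pyCapChars : List Char → List Char
  | [] => []
  | c :: t => PySem.Chars.upperChar c :: PySem.Chars.lower t

def pyCapitalize (w : String) : String := String.ofList (pyCapChars w.toList)

def pyReplacements : PySem.Dict String String := PySem.Dict.mk
  [("Sap", "SAP"), ("Erp", "ERP"), ("Rfp", "RFP"), ("Rfq", "RFQ"), ("Rfi", "RFI"),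
   ("Qa", "QA"), ("Qc", "QC"), ("Jit", "JIT"), ("Tco", "TCO"), ("P2p", "P2P"), ("S2p", "S2P")]

def format_skill_name_py (keyword : String) : String :=
  let words := PySem.Str.split₀ keyword
  let formatted := PySem.Str.join " " (words.map pyCapitalize)
  pyReplacements.items.foldl (fun f p => PySem.Str.replace f p.1 p.2) formatted

-- ===== PORT B =====
def bTable : List (List Char × List Char) :=
  [(['S','a','p'], ['S','A','P']), (['E','r','p'], ['E','R','P']), (['R','f','p'], ['R','F','P']),
   (['R','f','q'], ['R','F','Q']), (['R','f','i'], ['R','F','I']), (['Q','a'], ['Q','A']),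
   (['Q','c'], ['Q','C']), (['J','i','t'], ['J','I','T']), (['T','c','o'], ['T','C','O']),
   (['P','2','p'], ['P','2','P']), (['S','2','p'], ['S','2','P'])]

-- loop over _ABBREVIATIONS: first key the capitalized word starts with, abbr + w[len(key):]
def bKeyLoop (w : List Char) : List (List Char × List Char) → List Char
  | [] => w
  | (k, abbr) :: more =>
      if PySem.Chars.startswith w k then abbr ++ w.drop k.length
      else bKeyLoop w more

-- w = word.capitalize() (first char uppercased, rest lowercased), then the table loop
def bFormatWord (word : List Char) : List Char :=
  bKeyLoop (PySem.Chars.upper (word.take 1) ++ PySem.Chars.lower (word.drop 1)) bTable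

def format_skill_name_py_alt (keyword : String) : String :=
  PySem.Str.join " " ((PySem.Str.split₀ keyword).map (fun w => String.ofList (bFormatWord w.toList)))

-- ===== PRECONDITION & SPEC =====
-- On keywords containing a word whose lowercase form starts with sap2p/erp2p/rfp2p/rfqa/rfqc/jitco,
-- A's later replace passes re-match across the freshly uppercased abbreviation (e.g. 'jitco' → 'JITCO'),
-- an accident of running the replaces sequentially; B applies one abbreviation per word ('JITco'),
-- which is the intended formatting.
def D_format_skill_name_py (keyword : String) : Prop :=
  ((PySem.Str.split₀ keyword).any (fun w =>
    (["sap2p", "erp2p", "rfp2p", "rfqa", "rfqc", "jitco"] : List String).any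
      (fun p => PySem.Str.startswith (PySem.Str.lower w) p))) = true
instance (keyword : String) : Decidable (D_format_skill_name_py keyword) := by unfold D_format_skill_name_py; infer_instance

def Spec_format_skill_name_py (keyword : String) (out : String) : Prop :=
  ¬ D_format_skill_name_py keyword → out = format_skill_name_py_alt keyword
instance (keyword : String) (out : String) : Decidable (Spec_format_skill_name_py keyword out) := by unfold Spec_format_skill_name_py; infer_instance

def pvDiffWitness_format_skill_name_py : String := "jitco"
def pvDiffWitnessOut_format_skill_name_py : String × String := ("JITCO", "JITco")

-- ===== CLAIM (what is proved, stated in full; the proofs are below) =====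
def Claim_unchanged_format_skill_name_py : Prop := ∀ (keyword : String), Dom_format_skill_name_py keyword → Spec_format_skill_name_py keyword (format_skill_name_py keyword)
def Claim_changed_format_skill_name_py : Prop := Dom_format_skill_name_py (pvDiffWitness_format_skill_name_py) ∧ D_format_skill_name_py (pvDiffWitness_format_skill_name_py) ∧ format_skill_name_py (pvDiffWitness_format_skill_name_py) = pvDiffWitnessOut_format_skill_name_py.1 ∧ format_skill_name_py_alt (pvDiffWitness_format_skill_name_py) = pvDiffWitnessOut_format_skill_name_py.2 ∧ pvDiffWitnessOut_format_skill_name_py.1 ≠ pvDiffWitnessOut_format_skill_name_py.2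
def Claim_exact_format_skill_name_py : Prop := ∀ (keyword : String), Dom_format_skill_name_py keyword → D_format_skill_name_py keyword → format_skill_name_py keyword ≠ format_skill_name_py_alt keyword

-- ===== LEMMAS AND PROOFS =====

-- proof-side list of the six cascade prefixes (lowercase), mirroring D_'s string list
def pvCascades : List (List Char) :=
  [['s','a','p','2','p'], ['e','r','p','2','p'], ['r','f','p','2','p'],
   ['r','f','q','a'], ['r','f','q','c'], ['j','i','t','c','o']]

def pvRep (old new : List Char) : List Char → List Char
  | [] => []
  | c :: t =>
      if old.isPrefixOf (c :: t) then new ++ pvRep old new (t.drop (old.length - 1))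
      else c :: pvRep old new t
termination_by s => s.length
decreasing_by
all_goals (simp [List.length_drop]; try omega)

theorem pvRep_go (old new : List Char) (hold : old ≠ []) :
    ∀ fuel l acc, l.length ≤ fuel →
      PySem.Chars.replace.go old new fuel l acc = acc.reverse ++ pvRep old new l := by
  intro fuel
  induction fuel with
  | zero =>
    intro l acc h
    have : l = [] := List.length_eq_zero_iff.mp (Nat.le_zero.mp h)
    subst this
    simp [PySem.Chars.replace.go, pvRep]
  | succ n ih =>
    intro l acc h
    match l with
    | [] => simp [PySem.Chars.replace.go, pvRep]
    | c :: t =>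
      rw [PySem.Chars.replace.go]
      by_cases hp : old.isPrefixOf (c :: t)
      · rw [if_pos hp, pvRep, if_pos hp]
        obtain ⟨o, os, rfl⟩ : ∃ o os, old = o :: os := by
          cases old with | nil => exact absurd rfl hold | cons o os => exact ⟨o, os, rfl⟩
        have hdrop : (c :: t).drop (o :: os).length = t.drop ((o :: os).length - 1) := by
          simp
        rw [hdrop] at *
        rw [ih _ _ (by simp at h ⊢; omega)]
        simp
      · rw [if_neg hp, pvRep, if_neg hp]
        rw [ih _ _ (by simp at h; omega)]
        simp

theorem replace_eq_pvRep (s old new : List Char) (hold : old ≠ []) :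
    PySem.Chars.replace s old new = pvRep old new s := by
  rw [PySem.Chars.replace]
  rw [if_neg (by simp [List.isEmpty_iff, hold])]
  simpa using pvRep_go old new hold s.length s [] (le_refl _)

theorem pvRep_skip (old new : List Char) (c : Char) (t : List Char)
    (h : old.isPrefixOf (c :: t) = false) : pvRep old new (c :: t) = c :: pvRep old new t := by
  rw [pvRep, if_neg (by simp [h])]

theorem pvRep_match (old new t : List Char) (hold : old ≠ []) :
    pvRep old new (old ++ t) = new ++ pvRep old new t := by
  obtain ⟨o, os, rfl⟩ : ∃ o os, old = o :: os := by
    cases old with | nil => exact absurd rfl hold | cons o os => exact ⟨o, os, rfl⟩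
  have hp : (o :: os).isPrefixOf (o :: os ++ t) = true := by
    rw [List.isPrefixOf_iff_prefix]; exact ⟨t, by simp⟩
  rw [List.cons_append, pvRep, if_pos (by simpa using hp)]
  simp

theorem pvRep_id_noUpper (o : Char) (os new s : List Char) (hu : PySem.Chars.isupper o = true)
    (hs : ∀ c ∈ s, PySem.Chars.isupper c = false) : pvRep (o :: os) new s = s := by
  induction s with
  | nil => rw [pvRep]
  | cons c t ih =>
    have hoc : o ≠ c := by
      intro h; rw [h] at hu; exact absurd hu (by simp [hs c (List.mem_cons_self ..)])
    rw [pvRep_skip _ _ _ _ (by simp [List.isPrefixOf]; intro h; exact absurd h hoc)]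
    rw [ih (fun c hc => hs c (List.mem_cons_of_mem _ hc))]

theorem pvRep_space_nil (old new : List Char) (hold : old ≠ []) (hsp : ' ' ∉ old) (b : List Char) :
    pvRep old new (' ' :: b) = ' ' :: pvRep old new b := by
  have hnp : old.isPrefixOf (' ' :: b) = false := by
    rw [Bool.eq_false_iff]
    intro h
    rw [List.isPrefixOf_iff_prefix] at h
    obtain ⟨o, os, rfl⟩ : ∃ o os, old = o :: os := by
      cases old with | nil => exact absurd rfl hold | cons o os => exact ⟨o, os, rfl⟩
    have : o = ' ' := by
      obtain ⟨r, hr⟩ := h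
      exact (by simpa using congrArg (·.head?) hr.symm : (' ':Char) = o).symm
    exact hsp (this ▸ List.mem_cons_self ..)
  exact pvRep_skip _ _ _ _ hnp

theorem pvRep_space_aux (old new : List Char) (hold : old ≠ []) (hsp : ' ' ∉ old) :
    ∀ (n : Nat) (a : List Char), a.length ≤ n → ∀ b,
      pvRep old new (a ++ ' ' :: b) = pvRep old new a ++ ' ' :: pvRep old new b := by
  intro n
  induction n with
  | zero =>
    intro a ha b
    have : a = [] := List.length_eq_zero_iff.mp (Nat.le_zero.mp ha)
    subst this
    simp only [List.nil_append]
    rw [pvRep_space_nil old new hold hsp b, pvRep.eq_1]; rfl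
  | succ n ih =>
    intro a ha b
    match a with
    | [] =>
      simp only [List.nil_append]
      rw [pvRep_space_nil old new hold hsp b, pvRep.eq_1]; rfl
    | c :: as =>
      by_cases hp : old.isPrefixOf (c :: as ++ ' ' :: b) = true
      · -- the match lies entirely inside a = c :: as
        have hpre : old <+: (c :: as) ++ ' ' :: b := List.isPrefixOf_iff_prefix.mp hp
        have htake : old = ((c :: as) ++ ' ' :: b).take old.length := by
          exact List.prefix_iff_eq_take.mp hpre
        have holen : old.length ≤ (c :: as).length := by
          by_contra hgt
          push Not at hgt
          apply hsp
          rw [htake, List.take_append]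
          refine List.mem_append_right _ ?_
          have : 1 ≤ old.length - (c :: as).length := by omega
          rw [show (' ' :: b).take (old.length - (c :: as).length)
                = ' ' :: b.take (old.length - (c :: as).length - 1) from by
              cases h : old.length - (c :: as).length with
              | zero => omega
              | succ k => simp]
          exact List.mem_cons_self ..
        have hpa : old <+: c :: as := by
          rw [htake, List.take_append_of_le_length holen]
          exact List.take_prefix _ _
        obtain ⟨r, hr⟩ := hpa
        rw [← hr]
        have hrlen : r.length ≤ n := by
          have := congrArg List.length hr
          simp at this ha
          have : 1 ≤ old.length := by
            cases old with | nil => exact absurd rfl hold | cons _ _ => simp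
          omega
        rw [List.append_assoc, pvRep_match old new _ hold, pvRep_match old new _ hold,
            ih r hrlen b, List.append_assoc]
      · rw [Bool.not_eq_true] at hp
        have hpa : old.isPrefixOf (c :: as) = false := by
          rw [Bool.eq_false_iff]
          intro h
          rw [List.isPrefixOf_iff_prefix] at h
          have : old.isPrefixOf (c :: as ++ ' ' :: b) = true := by
            rw [List.isPrefixOf_iff_prefix]
            exact h.trans (by rw [List.cons_append]; exact ⟨' ' :: b, rfl⟩)
          rw [hp] at this
          exact Bool.false_ne_true this
        rw [show c :: as ++ ' ' :: b = c :: (as ++ ' ' :: b) from rfl,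
            pvRep_skip _ _ _ _ (by simpa using hp), pvRep_skip _ _ _ _ hpa]
        rw [ih as (by simpa using ha) b]
        rfl

theorem pvRep_space (old new : List Char) (hold : old ≠ []) (hsp : ' ' ∉ old) :
    ∀ a b, pvRep old new (a ++ ' ' :: b) = pvRep old new a ++ ' ' :: pvRep old new b :=
  fun a b => pvRep_space_aux old new hold hsp a.length a (le_refl _) b

theorem pvRep_join (old new : List Char) (hold : old ≠ []) (hsp : ' ' ∉ old) :
    ∀ parts, pvRep old new (PySem.Chars.join [' '] parts)
      = PySem.Chars.join [' '] (parts.map (pvRep old new)) := by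
  intro parts
  induction parts with
  | nil => simp [PySem.Chars.join_nil, pvRep]
  | cons p rest ih =>
    cases rest with
    | nil => simp [PySem.Chars.join_singleton]
    | cons q rest' =>
      rw [List.map_cons, List.map_cons, PySem.Chars.join_cons_cons, PySem.Chars.join_cons_cons,
          ← List.map_cons (f := pvRep old new) (a := q) (l := rest')]
      rw [show p ++ [' '] ++ PySem.Chars.join [' '] (q :: rest')
            = p ++ ' ' :: PySem.Chars.join [' '] (q :: rest') from by simp]
      rw [pvRep_space old new hold hsp, ih]
      simp

def pvChain (s : List Char) : List Char :=
  bTable.foldl (fun s p => pvRep p.1 p.2 s) s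

-- upperChar c = U (an uppercase letter) determines lowerChar c
theorem lowerChar_of_upperChar (c U l : Char) (hU : PySem.Chars.isupper U = true)
    (hl : PySem.Chars.lowerChar U = l) (h : PySem.Chars.upperChar c = U) :
    PySem.Chars.lowerChar c = l := by
  unfold PySem.Chars.isupper at hU
  simp only [Bool.and_eq_true, decide_eq_true_eq] at hU
  obtain ⟨hA, hZ⟩ := hU
  rw [Char.le_def, UInt32.le_iff_toNat_le] at hA hZ
  have hA' : 65 ≤ U.toNat := hA
  have hZ' : U.toNat ≤ 90 := hZ
  unfold PySem.Chars.upperChar at h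
  by_cases hlow : PySem.Chars.islower c = true
  · rw [if_pos hlow] at h
    unfold PySem.Chars.islower at hlow
    simp only [Bool.and_eq_true, decide_eq_true_eq] at hlow
    obtain ⟨ha, hz⟩ := hlow
    rw [Char.le_def, UInt32.le_iff_toNat_le] at ha hz
    have ha' : 97 ≤ c.toNat := ha
    have hz' : c.toNat ≤ 122 := hz
    have hofv : (Char.ofNat (c.toNat - 32)).toNat = c.toNat - 32 := by
      rw [Char.toNat_ofNat, if_pos (Or.inl (by omega))]
    have hUv : U.toNat = c.toNat - 32 := by rw [← h, hofv]
    -- lowerChar c = c since c is not uppercase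
    have hnotup : PySem.Chars.isupper c = false := by
      unfold PySem.Chars.isupper
      simp only [Bool.and_eq_false_iff]
      right
      simp only [decide_eq_false_iff_not]
      rw [Char.le_def, UInt32.le_iff_toNat_le]
      show ¬ c.toNat ≤ ('Z' : Char).toNat
      have : ('Z' : Char).toNat = 90 := rfl
      omega
    unfold PySem.Chars.lowerChar at hl ⊢
    rw [if_neg (by simp [hnotup])]
    rw [if_pos (by unfold PySem.Chars.isupper
                   simp only [Bool.and_eq_true, decide_eq_true_eq]
                   constructor <;> (rw [Char.le_def, UInt32.le_iff_toNat_le]; first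
                     | (show (65:Nat) ≤ U.toNat; omega) | (show U.toNat ≤ 90; omega)))] at hl
    rw [← hl]
    have : U.toNat + 32 = c.toNat := by omega
    rw [this]
    exact (Char.ofNat_toNat c).symm
  · rw [if_neg hlow] at h
    rw [h, hl]

theorem pvCore_Sap (rest : List Char) (hrest : ∀ c ∈ rest, PySem.Chars.isupper c = false)
    (hc : (['2','p'] : List Char).isPrefixOf rest = false) :
    pvChain ('S' :: 'a' :: 'p' :: rest) = bKeyLoop ('S' :: 'a' :: 'p' :: rest) bTable := by
  have hid : ∀ (o : Char) (os new : List Char), PySem.Chars.isupper o = true →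
      pvRep (o :: os) new rest = rest := fun o os new hu => pvRep_id_noUpper o os new rest hu hrest
  simp [pvChain, bTable, bKeyLoop, PySem.Chars.startswith,
        pvRep, PySem.Chars.isupper, hid, hc]

theorem pvCore_Erp (rest : List Char) (hrest : ∀ c ∈ rest, PySem.Chars.isupper c = false)
    (hc : (['2','p'] : List Char).isPrefixOf rest = false) :
    pvChain ('E' :: 'r' :: 'p' :: rest) = bKeyLoop ('E' :: 'r' :: 'p' :: rest) bTable := by
  have hid : ∀ (o : Char) (os new : List Char), PySem.Chars.isupper o = true →
      pvRep (o :: os) new rest = rest := fun o os new hu => pvRep_id_noUpper o os new rest hu hrest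
  simp [pvChain, bTable, bKeyLoop, PySem.Chars.startswith,
        pvRep, PySem.Chars.isupper, hid, hc]

theorem pvCore_Rfp (rest : List Char) (hrest : ∀ c ∈ rest, PySem.Chars.isupper c = false)
    (hc : (['2','p'] : List Char).isPrefixOf rest = false) :
    pvChain ('R' :: 'f' :: 'p' :: rest) = bKeyLoop ('R' :: 'f' :: 'p' :: rest) bTable := by
  have hid : ∀ (o : Char) (os new : List Char), PySem.Chars.isupper o = true →
      pvRep (o :: os) new rest = rest := fun o os new hu => pvRep_id_noUpper o os new rest hu hrest
  simp [pvChain, bTable, bKeyLoop, PySem.Chars.startswith,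
        pvRep, PySem.Chars.isupper, hid, hc]

theorem pvCore_Rfq (rest : List Char) (hrest : ∀ c ∈ rest, PySem.Chars.isupper c = false)
    (ha : (['a'] : List Char).isPrefixOf rest = false)
    (hcq : (['c'] : List Char).isPrefixOf rest = false) :
    pvChain ('R' :: 'f' :: 'q' :: rest) = bKeyLoop ('R' :: 'f' :: 'q' :: rest) bTable := by
  have hid : ∀ (o : Char) (os new : List Char), PySem.Chars.isupper o = true →
      pvRep (o :: os) new rest = rest := fun o os new hu => pvRep_id_noUpper o os new rest hu hrest
  simp [pvChain, bTable, bKeyLoop, PySem.Chars.startswith,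
        pvRep, PySem.Chars.isupper, hid, ha, hcq]

theorem pvCore_Rfi (rest : List Char) (hrest : ∀ c ∈ rest, PySem.Chars.isupper c = false) :
    pvChain ('R' :: 'f' :: 'i' :: rest) = bKeyLoop ('R' :: 'f' :: 'i' :: rest) bTable := by
  have hid : ∀ (o : Char) (os new : List Char), PySem.Chars.isupper o = true →
      pvRep (o :: os) new rest = rest := fun o os new hu => pvRep_id_noUpper o os new rest hu hrest
  simp [pvChain, bTable, bKeyLoop, PySem.Chars.startswith,
        pvRep, PySem.Chars.isupper, hid]

theorem pvCore_Qa (rest : List Char) (hrest : ∀ c ∈ rest, PySem.Chars.isupper c = false) :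
    pvChain ('Q' :: 'a' :: rest) = bKeyLoop ('Q' :: 'a' :: rest) bTable := by
  have hid : ∀ (o : Char) (os new : List Char), PySem.Chars.isupper o = true →
      pvRep (o :: os) new rest = rest := fun o os new hu => pvRep_id_noUpper o os new rest hu hrest
  simp [pvChain, bTable, bKeyLoop, PySem.Chars.startswith,
        pvRep, PySem.Chars.isupper, hid]

theorem pvCore_Qc (rest : List Char) (hrest : ∀ c ∈ rest, PySem.Chars.isupper c = false) :
    pvChain ('Q' :: 'c' :: rest) = bKeyLoop ('Q' :: 'c' :: rest) bTable := by
  have hid : ∀ (o : Char) (os new : List Char), PySem.Chars.isupper o = true →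
      pvRep (o :: os) new rest = rest := fun o os new hu => pvRep_id_noUpper o os new rest hu hrest
  simp [pvChain, bTable, bKeyLoop, PySem.Chars.startswith,
        pvRep, PySem.Chars.isupper, hid]

theorem pvCore_Jit (rest : List Char) (hrest : ∀ c ∈ rest, PySem.Chars.isupper c = false)
    (hc : (['c','o'] : List Char).isPrefixOf rest = false) :
    pvChain ('J' :: 'i' :: 't' :: rest) = bKeyLoop ('J' :: 'i' :: 't' :: rest) bTable := by
  have hid : ∀ (o : Char) (os new : List Char), PySem.Chars.isupper o = true →
      pvRep (o :: os) new rest = rest := fun o os new hu => pvRep_id_noUpper o os new rest hu hrest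
  simp [pvChain, bTable, bKeyLoop, PySem.Chars.startswith,
        pvRep, PySem.Chars.isupper, hid, hc]

theorem pvCore_Tco (rest : List Char) (hrest : ∀ c ∈ rest, PySem.Chars.isupper c = false) :
    pvChain ('T' :: 'c' :: 'o' :: rest) = bKeyLoop ('T' :: 'c' :: 'o' :: rest) bTable := by
  have hid : ∀ (o : Char) (os new : List Char), PySem.Chars.isupper o = true →
      pvRep (o :: os) new rest = rest := fun o os new hu => pvRep_id_noUpper o os new rest hu hrest
  simp [pvChain, bTable, bKeyLoop, PySem.Chars.startswith,
        pvRep, PySem.Chars.isupper, hid]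

theorem pvCore_P2p (rest : List Char) (hrest : ∀ c ∈ rest, PySem.Chars.isupper c = false) :
    pvChain ('P' :: '2' :: 'p' :: rest) = bKeyLoop ('P' :: '2' :: 'p' :: rest) bTable := by
  have hid : ∀ (o : Char) (os new : List Char), PySem.Chars.isupper o = true →
      pvRep (o :: os) new rest = rest := fun o os new hu => pvRep_id_noUpper o os new rest hu hrest
  simp [pvChain, bTable, bKeyLoop, PySem.Chars.startswith,
        pvRep, PySem.Chars.isupper, hid]

theorem pvCore_S2p (rest : List Char) (hrest : ∀ c ∈ rest, PySem.Chars.isupper c = false) :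
    pvChain ('S' :: '2' :: 'p' :: rest) = bKeyLoop ('S' :: '2' :: 'p' :: rest) bTable := by
  have hid : ∀ (o : Char) (os new : List Char), PySem.Chars.isupper o = true →
      pvRep (o :: os) new rest = rest := fun o os new hu => pvRep_id_noUpper o os new rest hu hrest
  simp [pvChain, bTable, bKeyLoop, PySem.Chars.startswith,
        pvRep, PySem.Chars.isupper, hid]

theorem pvCore_none (u : Char) (L : List Char) (hL : ∀ c ∈ L, PySem.Chars.isupper c = false)
    (h1 : ¬ (['S','a','p'] : List Char).isPrefixOf (u :: L) = true)
    (h2 : ¬ (['E','r','p'] : List Char).isPrefixOf (u :: L) = true)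
    (h3 : ¬ (['R','f','p'] : List Char).isPrefixOf (u :: L) = true)
    (h4 : ¬ (['R','f','q'] : List Char).isPrefixOf (u :: L) = true)
    (h5 : ¬ (['R','f','i'] : List Char).isPrefixOf (u :: L) = true)
    (h6 : ¬ (['Q','a'] : List Char).isPrefixOf (u :: L) = true)
    (h7 : ¬ (['Q','c'] : List Char).isPrefixOf (u :: L) = true)
    (h8 : ¬ (['J','i','t'] : List Char).isPrefixOf (u :: L) = true)
    (h9 : ¬ (['T','c','o'] : List Char).isPrefixOf (u :: L) = true)
    (h10 : ¬ (['P','2','p'] : List Char).isPrefixOf (u :: L) = true)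
    (h11 : ¬ (['S','2','p'] : List Char).isPrefixOf (u :: L) = true)
    : pvChain (u :: L) = bKeyLoop (u :: L) bTable := by
  have hid : ∀ (o : Char) (os new : List Char), PySem.Chars.isupper o = true →
      pvRep (o :: os) new L = L := fun o os new hu => pvRep_id_noUpper o os new L hu hL
  simp [pvChain, bTable, bKeyLoop, PySem.Chars.startswith,
          pvRep, PySem.Chars.isupper, hid, h1, h2, h3, h4, h5, h6, h7, h8, h9, h10, h11]

set_option maxHeartbeats 400000 in
theorem isupper_lowerChar (c : Char) : PySem.Chars.isupper (PySem.Chars.lowerChar c) = false := by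
  unfold PySem.Chars.lowerChar
  by_cases h : PySem.Chars.isupper c = true
  · rw [if_pos h]
    unfold PySem.Chars.isupper at *
    simp only [Bool.and_eq_true, decide_eq_true_eq] at h
    obtain ⟨hA, hZ⟩ := h
    rw [Char.le_def, UInt32.le_iff_toNat_le] at hA hZ
    have hz' : c.toNat ≤ 90 := hZ
    have ha' : 65 ≤ c.toNat := hA
    have hval : (Char.ofNat (c.toNat + 32)).toNat = c.toNat + 32 := by
      rw [Char.toNat_ofNat, if_pos (Or.inl (by omega))]
    have hZv : ('Z' : Char).val.toNat = 90 := rfl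
    have hnle : ¬ (Char.ofNat (c.toNat + 32) ≤ 'Z') := by
      rw [Char.le_def, UInt32.le_iff_toNat_le]
      show ¬ (Char.ofNat (c.toNat + 32)).toNat ≤ ('Z' : Char).val.toNat
      rw [hval, hZv]
      omega
    simp [hnle]
  · rw [if_neg h]
    simpa using h

-- from the non-cascade hypothesis on the lowercased word to one on the capitalized word
theorem pvCascBridge (c : Char) (t : List Char) (U l : Char) (pat : List Char)
    (hU : PySem.Chars.isupper U = true) (hl : PySem.Chars.lowerChar U = l)
    (hf : PySem.Chars.startswith (PySem.Chars.lower (c :: t)) (l :: pat) = false) :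
    (U :: pat).isPrefixOf (PySem.Chars.upperChar c :: PySem.Chars.lower t) = false := by
  rw [Bool.eq_false_iff]
  intro htrue
  rw [List.isPrefixOf_iff_prefix, List.cons_prefix_cons] at htrue
  obtain ⟨hUc, hpat⟩ := htrue
  have hlc : PySem.Chars.lowerChar c = l := lowerChar_of_upperChar c U l hU hl hUc.symm
  have : PySem.Chars.startswith (PySem.Chars.lower (c :: t)) (l :: pat) = true := by
    rw [PySem.Chars.startswith, List.isPrefixOf_iff_prefix]
    show l :: pat <+: PySem.Chars.lower (c :: t)
    have hcons : PySem.Chars.lower (c :: t) = PySem.Chars.lowerChar c :: PySem.Chars.lower t := rfl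
    rw [hcons, hlc]
    exact List.cons_prefix_cons.mpr ⟨rfl, hpat⟩
  rw [hf] at this
  exact Bool.false_ne_true this

theorem pvWord (w : List Char)
    (hnc : ∀ p ∈ pvCascades, PySem.Chars.startswith (PySem.Chars.lower w) p = false) :
    pvChain (pyCapChars w) = bFormatWord w := by
  cases w with
  | nil =>
    simp [pyCapChars, pvChain, bTable, bFormatWord, bKeyLoop,
          PySem.Chars.startswith, pvRep, PySem.Chars.upper, PySem.Chars.lower]
  | cons c t =>
    have hL : ∀ x ∈ PySem.Chars.lower t, PySem.Chars.isupper x = false := by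
      intro x hx
      rw [PySem.Chars.lower] at hx
      obtain ⟨y, _, rfl⟩ := List.mem_map.mp hx
      exact isupper_lowerChar y
    have hgoalB : bFormatWord (c :: t)
        = bKeyLoop (PySem.Chars.upperChar c :: PySem.Chars.lower t) bTable := by
      simp [bFormatWord, PySem.Chars.upper, PySem.Chars.lower]
    rw [show pyCapChars (c :: t) = PySem.Chars.upperChar c :: PySem.Chars.lower t from rfl, hgoalB]
    -- the six cascade exclusions on the capitalized word
    have hcS := pvCascBridge c t 'S' 's' ['a','p','2','p'] (by decide) (by decide)
      (hnc ['s','a','p','2','p'] (by simp [pvCascades]))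
    have hcE := pvCascBridge c t 'E' 'e' ['r','p','2','p'] (by decide) (by decide)
      (hnc ['e','r','p','2','p'] (by simp [pvCascades]))
    have hcR := pvCascBridge c t 'R' 'r' ['f','p','2','p'] (by decide) (by decide)
      (hnc ['r','f','p','2','p'] (by simp [pvCascades]))
    have hcQa := pvCascBridge c t 'R' 'r' ['f','q','a'] (by decide) (by decide)
      (hnc ['r','f','q','a'] (by simp [pvCascades]))
    have hcQc := pvCascBridge c t 'R' 'r' ['f','q','c'] (by decide) (by decide)
      (hnc ['r','f','q','c'] (by simp [pvCascades]))
    have hcJ := pvCascBridge c t 'J' 'j' ['i','t','c','o'] (by decide) (by decide)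
      (hnc ['j','i','t','c','o'] (by simp [pvCascades]))
    -- dispatch on which key (if any) the capitalized word starts with
    set u := PySem.Chars.upperChar c with hu
    set L := PySem.Chars.lower t with hLdef
    clear_value u L
    by_cases h1 : (['S','a','p'] : List Char).isPrefixOf (u :: L) = true
    · rw [List.isPrefixOf_iff_prefix] at h1
      obtain ⟨rest, hr⟩ := h1
      injection hr with hu' hL'
      subst hu'
      rw [← hL'] at hcS hL ⊢
      have hc : (['2','p'] : List Char).isPrefixOf rest = false := by
        simpa [List.isPrefixOf] using hcS
      exact pvCore_Sap rest (fun x hx => hL x (by simp [hx])) hc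
    · by_cases h2 : (['E','r','p'] : List Char).isPrefixOf (u :: L) = true
      · rw [List.isPrefixOf_iff_prefix] at h2
        obtain ⟨rest, hr⟩ := h2
        injection hr with hu' hL'
        subst hu'
        rw [← hL'] at hcE hL ⊢
        have hc : (['2','p'] : List Char).isPrefixOf rest = false := by
          simpa [List.isPrefixOf] using hcE
        exact pvCore_Erp rest (fun x hx => hL x (by simp [hx])) hc
      · by_cases h3 : (['R','f','p'] : List Char).isPrefixOf (u :: L) = true
        · rw [List.isPrefixOf_iff_prefix] at h3
          obtain ⟨rest, hr⟩ := h3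
          injection hr with hu' hL'
          subst hu'
          rw [← hL'] at hcR hL ⊢
          have hc : (['2','p'] : List Char).isPrefixOf rest = false := by
            simpa [List.isPrefixOf] using hcR
          exact pvCore_Rfp rest (fun x hx => hL x (by simp [hx])) hc
        · by_cases h4 : (['R','f','q'] : List Char).isPrefixOf (u :: L) = true
          · rw [List.isPrefixOf_iff_prefix] at h4
            obtain ⟨rest, hr⟩ := h4
            injection hr with hu' hL'
            subst hu'
            rw [← hL'] at hcQa hcQc hL ⊢
            have hca : (['a'] : List Char).isPrefixOf rest = false := by
              simpa [List.isPrefixOf] using hcQa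
            have hcc : (['c'] : List Char).isPrefixOf rest = false := by
              simpa [List.isPrefixOf] using hcQc
            exact pvCore_Rfq rest (fun x hx => hL x (by simp [hx])) hca hcc
          · by_cases h5 : (['R','f','i'] : List Char).isPrefixOf (u :: L) = true
            · rw [List.isPrefixOf_iff_prefix] at h5
              obtain ⟨rest, hr⟩ := h5
              injection hr with hu' hL'
              subst hu'
              rw [← hL'] at hL ⊢
              exact pvCore_Rfi rest (fun x hx => hL x (by simp [hx]))
            · by_cases h6 : (['Q','a'] : List Char).isPrefixOf (u :: L) = true
              · rw [List.isPrefixOf_iff_prefix] at h6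
                obtain ⟨rest, hr⟩ := h6
                injection hr with hu' hL'
                subst hu'
                rw [← hL'] at hL ⊢
                exact pvCore_Qa rest (fun x hx => hL x (by simp [hx]))
              · by_cases h7 : (['Q','c'] : List Char).isPrefixOf (u :: L) = true
                · rw [List.isPrefixOf_iff_prefix] at h7
                  obtain ⟨rest, hr⟩ := h7
                  injection hr with hu' hL'
                  subst hu'
                  rw [← hL'] at hL ⊢
                  exact pvCore_Qc rest (fun x hx => hL x (by simp [hx]))
                · by_cases h8 : (['J','i','t'] : List Char).isPrefixOf (u :: L) = true
                  · rw [List.isPrefixOf_iff_prefix] at h8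
                    obtain ⟨rest, hr⟩ := h8
                    injection hr with hu' hL'
                    subst hu'
                    rw [← hL'] at hcJ hL ⊢
                    have hc : (['c','o'] : List Char).isPrefixOf rest = false := by
                      simpa [List.isPrefixOf] using hcJ
                    exact pvCore_Jit rest (fun x hx => hL x (by simp [hx])) hc
                  · by_cases h9 : (['T','c','o'] : List Char).isPrefixOf (u :: L) = true
                    · rw [List.isPrefixOf_iff_prefix] at h9
                      obtain ⟨rest, hr⟩ := h9
                      injection hr with hu' hL'
                      subst hu'
                      rw [← hL'] at hL ⊢
                      exact pvCore_Tco rest (fun x hx => hL x (by simp [hx]))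
                    · by_cases h10 : (['P','2','p'] : List Char).isPrefixOf (u :: L) = true
                      · rw [List.isPrefixOf_iff_prefix] at h10
                        obtain ⟨rest, hr⟩ := h10
                        injection hr with hu' hL'
                        subst hu'
                        rw [← hL'] at hL ⊢
                        exact pvCore_P2p rest (fun x hx => hL x (by simp [hx]))
                      · by_cases h11 : (['S','2','p'] : List Char).isPrefixOf (u :: L) = true
                        · rw [List.isPrefixOf_iff_prefix] at h11
                          obtain ⟨rest, hr⟩ := h11
                          injection hr with hu' hL'
                          subst hu'
                          rw [← hL'] at hL ⊢
                          exact pvCore_S2p rest (fun x hx => hL x (by simp [hx]))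
                        · exact pvCore_none u L hL h1 h2 h3 h4 h5 h6 h7 h8 h9 h10 h11


-- lowerChar c = l (a lowercase letter) determines upperChar c
theorem upperChar_of_lowerChar (c l U : Char) (hl : PySem.Chars.islower l = true)
    (hU : PySem.Chars.upperChar l = U) (h : PySem.Chars.lowerChar c = l) :
    PySem.Chars.upperChar c = U := by
  unfold PySem.Chars.islower at hl
  simp only [Bool.and_eq_true, decide_eq_true_eq] at hl
  obtain ⟨ha, hz⟩ := hl
  rw [Char.le_def, UInt32.le_iff_toNat_le] at ha hz
  have ha' : 97 ≤ l.toNat := ha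
  have hz' : l.toNat ≤ 122 := hz
  unfold PySem.Chars.lowerChar at h
  by_cases hup : PySem.Chars.isupper c = true
  · rw [if_pos hup] at h
    unfold PySem.Chars.isupper at hup
    simp only [Bool.and_eq_true, decide_eq_true_eq] at hup
    obtain ⟨hA, hZ⟩ := hup
    rw [Char.le_def, UInt32.le_iff_toNat_le] at hA hZ
    have hA' : 65 ≤ c.toNat := hA
    have hZ' : c.toNat ≤ 90 := hZ
    have hofv : (Char.ofNat (c.toNat + 32)).toNat = c.toNat + 32 := by
      rw [Char.toNat_ofNat, if_pos (Or.inl (by omega))]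
    have hlv : l.toNat = c.toNat + 32 := by rw [← h, hofv]
    have hnotlow : PySem.Chars.islower c = false := by
      unfold PySem.Chars.islower
      simp only [Bool.and_eq_false_iff]
      left
      simp only [decide_eq_false_iff_not]
      rw [Char.le_def, UInt32.le_iff_toNat_le]
      show ¬ ('a' : Char).toNat ≤ c.toNat
      have hav : ('a' : Char).toNat = 97 := rfl
      omega
    unfold PySem.Chars.upperChar at hU ⊢
    rw [if_neg (by simp [hnotlow])]
    rw [if_pos (by unfold PySem.Chars.islower
                   simp only [Bool.and_eq_true, decide_eq_true_eq]
                   constructor <;> (rw [Char.le_def, UInt32.le_iff_toNat_le]; first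
                     | (show (97:Nat) ≤ l.toNat; omega) | (show l.toNat ≤ 122; omega)))] at hU
    rw [← hU]
    have hsub : l.toNat - 32 = c.toNat := by omega
    rw [hsub]
    exact (Char.ofNat_toNat c).symm
  · rw [if_neg hup] at h
    rw [h, hU]

-- pvRep preserves length when old and new have the same length
theorem pvRep_length (old new : List Char) (h : old.length = new.length) (hold : old ≠ []) :
    ∀ s, (pvRep old new s).length = s.length := by
  have H : ∀ n (s : List Char), s.length ≤ n → (pvRep old new s).length = s.length := by
    intro n
    induction n with
    | zero =>
      intro s hs
      have : s = [] := List.length_eq_zero_iff.mp (Nat.le_zero.mp hs)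
      subst this
      rw [pvRep]
    | succ n ih =>
      intro s hs
      match s with
      | [] => rw [pvRep]
      | c :: t =>
        rw [pvRep]
        by_cases hp : old.isPrefixOf (c :: t) = true
        · rw [if_pos hp]
          have hle : old.length ≤ t.length + 1 := by
            have := (List.isPrefixOf_iff_prefix.mp hp).length_le
            simpa using this
          have h1 : 1 ≤ old.length := by
            cases old with | nil => exact absurd rfl hold | cons _ _ => simp
          rw [List.length_append, ih _ (by simp only [List.length_drop]; simp only [List.length_cons] at hs; omega)]
          simp only [List.length_drop, List.length_cons]
          omega
        · rw [if_neg (by simpa using hp)]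
          simp only [List.length_cons]
          rw [ih t (by simpa using Nat.le_of_succ_le_succ hs)]
  exact fun s => H s.length s le_rfl

theorem pvChain_length (s : List Char) : (pvChain s).length = s.length := by
  simp only [pvChain, bTable, List.foldl]
  rw [pvRep_length _ _ (by decide) (by decide), pvRep_length _ _ (by decide) (by decide),
      pvRep_length _ _ (by decide) (by decide), pvRep_length _ _ (by decide) (by decide),
      pvRep_length _ _ (by decide) (by decide), pvRep_length _ _ (by decide) (by decide),
      pvRep_length _ _ (by decide) (by decide), pvRep_length _ _ (by decide) (by decide),
      pvRep_length _ _ (by decide) (by decide), pvRep_length _ _ (by decide) (by decide),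
      pvRep_length _ _ (by decide) (by decide)]

theorem bKeyLoop_length (w : List Char) :
    ∀ tbl : List (List Char × List Char), (∀ p ∈ tbl, p.1.length = p.2.length) →
      (bKeyLoop w tbl).length = w.length := by
  intro tbl
  induction tbl with
  | nil => intro _; rw [bKeyLoop]
  | cons p more ih =>
    intro hp
    obtain ⟨k, abbr⟩ := p
    rw [bKeyLoop]
    by_cases hs : PySem.Chars.startswith w k = true
    · rw [if_pos hs]
      have hle : k.length ≤ w.length := (List.isPrefixOf_iff_prefix.mp hs).length_le
      have hk : k.length = abbr.length := hp (k, abbr) (List.mem_cons_self ..)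
      simp only [List.length_append, List.length_drop]
      omega
    · rw [if_neg (by simpa using hs)]
      exact ih (fun q hq => hp q (List.mem_cons_of_mem _ hq))

theorem pvWordLen (w : List Char) : (pvChain (pyCapChars w)).length = (bFormatWord w).length := by
  rw [pvChain_length, bFormatWord, bKeyLoop_length _ bTable (by decide)]
  cases w <;> simp [pyCapChars, PySem.Chars.upper, PySem.Chars.lower]

-- joining with ' ' is injective on lists of componentwise-equal lengths
theorem pvJoin_inj : ∀ (xs ys : List (List Char)),
    List.Forall₂ (fun a b : List Char => a.length = b.length) xs ys →
    PySem.Chars.join [' '] xs = PySem.Chars.join [' '] ys → xs = ys := by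
  intro xs ys h
  induction h with
  | nil => intro _; rfl
  | @cons x y xs ys hxy htail ih =>
    intro hj
    cases htail with
    | nil =>
      rw [PySem.Chars.join_singleton, PySem.Chars.join_singleton] at hj
      rw [hj]
    | @cons x2 y2 xs2 ys2 hxy2 h2 =>
      rw [PySem.Chars.join_cons_cons, PySem.Chars.join_cons_cons] at hj
      rw [List.append_assoc, List.append_assoc] at hj
      obtain ⟨h1, h2'⟩ := List.append_inj hj hxy
      have hjt : PySem.Chars.join [' '] (x2 :: xs2) = PySem.Chars.join [' '] (y2 :: ys2) := by
        simpa using h2'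
      rw [h1, ih hjt]

-- A's output, written as the join of the per-word chained replacements
theorem pvA_toList (keyword : String) :
    (format_skill_name_py keyword).toList
      = PySem.Chars.join [' ']
          ((PySem.Str.split₀ keyword).map (fun w => pvChain (pyCapChars w.toList))) := by
  rw [format_skill_name_py]
  have hitems : pyReplacements.items =
      [("Sap", "SAP"), ("Erp", "ERP"), ("Rfp", "RFP"), ("Rfq", "RFQ"), ("Rfi", "RFI"),
       ("Qa", "QA"), ("Qc", "QC"), ("Jit", "JIT"), ("Tco", "TCO"), ("P2p", "P2P"), ("S2p", "S2P")] := rfl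
  rw [hitems]
  simp only [List.foldl, PySem.Str.toList_replace, PySem.Str.toList_join, List.map_map]
  have hsp : (" " : String).toList = [' '] := rfl
  rw [hsp]
  simp only [show ("Sap":String).toList = ['S','a','p'] from rfl, show ("SAP":String).toList = ['S','A','P'] from rfl, show ("Erp":String).toList = ['E','r','p'] from rfl, show ("ERP":String).toList = ['E','R','P'] from rfl, show ("Rfp":String).toList = ['R','f','p'] from rfl, show ("RFP":String).toList = ['R','F','P'] from rfl, show ("Rfq":String).toList = ['R','f','q'] from rfl, show ("RFQ":String).toList = ['R','F','Q'] from rfl, show ("Rfi":String).toList = ['R','f','i'] from rfl, show ("RFI":String).toList = ['R','F','I'] from rfl, show ("Qa":String).toList = ['Q','a'] from rfl, show ("QA":String).toList = ['Q','A'] from rfl, show ("Qc":String).toList = ['Q','c'] from rfl, show ("QC":String).toList = ['Q','C'] from rfl, show ("Jit":String).toList = ['J','i','t'] from rfl, show ("JIT":String).toList = ['J','I','T'] from rfl, show ("Tco":String).toList = ['T','c','o'] from rfl, show ("TCO":String).toList = ['T','C','O'] from rfl, show ("P2p":String).toList = ['P','2','p'] from rfl, show ("P2P":String).toList = ['P','2','P']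 from rfl, show ("S2p":String).toList = ['S','2','p'] from rfl, show ("S2P":String).toList = ['S','2','P'] from rfl]
  rw [replace_eq_pvRep _ ['S','a','p'] ['S','A','P'] (by simp), replace_eq_pvRep _ ['E','r','p'] ['E','R','P'] (by simp), replace_eq_pvRep _ ['R','f','p'] ['R','F','P'] (by simp), replace_eq_pvRep _ ['R','f','q'] ['R','F','Q'] (by simp), replace_eq_pvRep _ ['R','f','i'] ['R','F','I'] (by simp), replace_eq_pvRep _ ['Q','a'] ['Q','A'] (by simp), replace_eq_pvRep _ ['Q','c'] ['Q','C'] (by simp), replace_eq_pvRep _ ['J','i','t'] ['J','I','T'] (by simp), replace_eq_pvRep _ ['T','c','o'] ['T','C','O'] (by simp), replace_eq_pvRep _ ['P','2','p'] ['P','2','P'] (by simp), replace_eq_pvRep _ ['S','2','p'] ['S','2','P'] (by simp)]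
  rw [pvRep_join ['S','a','p'] ['S','A','P'] (by simp) (by simp), pvRep_join ['E','r','p'] ['E','R','P'] (by simp) (by simp), pvRep_join ['R','f','p'] ['R','F','P'] (by simp) (by simp), pvRep_join ['R','f','q'] ['R','F','Q'] (by simp) (by simp), pvRep_join ['R','f','i'] ['R','F','I'] (by simp) (by simp), pvRep_join ['Q','a'] ['Q','A'] (by simp) (by simp), pvRep_join ['Q','c'] ['Q','C'] (by simp) (by simp), pvRep_join ['J','i','t'] ['J','I','T'] (by simp) (by simp), pvRep_join ['T','c','o'] ['T','C','O'] (by simp) (by simp), pvRep_join ['P','2','p'] ['P','2','P'] (by simp) (by simp), pvRep_join ['S','2','p'] ['S','2','P'] (by simp) (by simp)]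
  simp only [List.map_map]
  refine congrArg (PySem.Chars.join [' ']) (List.map_congr_left ?_)
  intro w _
  simp [pvChain, bTable, pyCapitalize]

-- B's output, written as the join of the per-word results
theorem pvB_toList (keyword : String) :
    (format_skill_name_py_alt keyword).toList
      = PySem.Chars.join [' ']
          ((PySem.Str.split₀ keyword).map (fun w => bFormatWord w.toList)) := by
  rw [format_skill_name_py_alt]
  simp only [PySem.Str.toList_join, List.map_map]
  rw [show (" " : String).toList = [' '] from rfl]
  refine congrArg _ (List.map_congr_left ?_)
  intro w _
  simp

theorem pvDiff_Sap (rest : List Char) (hrest : ∀ c ∈ rest, PySem.Chars.isupper c = false) :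
    pvChain ('S' :: 'a' :: 'p' :: '2' :: 'p' :: rest) ≠ bKeyLoop ('S' :: 'a' :: 'p' :: '2' :: 'p' :: rest) bTable := by
  have hid : ∀ (o : Char) (os new : List Char), PySem.Chars.isupper o = true →
      pvRep (o :: os) new rest = rest := fun o os new hu => pvRep_id_noUpper o os new rest hu hrest
  simp [pvChain, bTable, bKeyLoop, PySem.Chars.startswith, pvRep, PySem.Chars.isupper, hid]

theorem pvDiff_Erp (rest : List Char) (hrest : ∀ c ∈ rest, PySem.Chars.isupper c = false) :
    pvChain ('E' :: 'r' :: 'p' :: '2' :: 'p' :: rest) ≠ bKeyLoop ('E' :: 'r' :: 'p' :: '2' :: 'p' :: rest) bTable := by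
  have hid : ∀ (o : Char) (os new : List Char), PySem.Chars.isupper o = true →
      pvRep (o :: os) new rest = rest := fun o os new hu => pvRep_id_noUpper o os new rest hu hrest
  simp [pvChain, bTable, bKeyLoop, PySem.Chars.startswith, pvRep, PySem.Chars.isupper, hid]

theorem pvDiff_Rfp (rest : List Char) (hrest : ∀ c ∈ rest, PySem.Chars.isupper c = false) :
    pvChain ('R' :: 'f' :: 'p' :: '2' :: 'p' :: rest) ≠ bKeyLoop ('R' :: 'f' :: 'p' :: '2' :: 'p' :: rest) bTable := by
  have hid : ∀ (o : Char) (os new : List Char), PySem.Chars.isupper o = true →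
      pvRep (o :: os) new rest = rest := fun o os new hu => pvRep_id_noUpper o os new rest hu hrest
  simp [pvChain, bTable, bKeyLoop, PySem.Chars.startswith, pvRep, PySem.Chars.isupper, hid]

theorem pvDiff_Rfqa (rest : List Char) (hrest : ∀ c ∈ rest, PySem.Chars.isupper c = false) :
    pvChain ('R' :: 'f' :: 'q' :: 'a' :: rest) ≠ bKeyLoop ('R' :: 'f' :: 'q' :: 'a' :: rest) bTable := by
  have hid : ∀ (o : Char) (os new : List Char), PySem.Chars.isupper o = true →
      pvRep (o :: os) new rest = rest := fun o os new hu => pvRep_id_noUpper o os new rest hu hrest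
  simp [pvChain, bTable, bKeyLoop, PySem.Chars.startswith, pvRep, PySem.Chars.isupper, hid]

theorem pvDiff_Rfqc (rest : List Char) (hrest : ∀ c ∈ rest, PySem.Chars.isupper c = false) :
    pvChain ('R' :: 'f' :: 'q' :: 'c' :: rest) ≠ bKeyLoop ('R' :: 'f' :: 'q' :: 'c' :: rest) bTable := by
  have hid : ∀ (o : Char) (os new : List Char), PySem.Chars.isupper o = true →
      pvRep (o :: os) new rest = rest := fun o os new hu => pvRep_id_noUpper o os new rest hu hrest
  simp [pvChain, bTable, bKeyLoop, PySem.Chars.startswith, pvRep, PySem.Chars.isupper, hid]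

theorem pvDiff_Jit (rest : List Char) (hrest : ∀ c ∈ rest, PySem.Chars.isupper c = false) :
    pvChain ('J' :: 'i' :: 't' :: 'c' :: 'o' :: rest) ≠ bKeyLoop ('J' :: 'i' :: 't' :: 'c' :: 'o' :: rest) bTable := by
  have hid : ∀ (o : Char) (os new : List Char), PySem.Chars.isupper o = true →
      pvRep (o :: os) new rest = rest := fun o os new hu => pvRep_id_noUpper o os new rest hu hrest
  simp [pvChain, bTable, bKeyLoop, PySem.Chars.startswith, pvRep, PySem.Chars.isupper, hid]

-- ===== VERDICT (by name: the statements are the Claim_ definitions above) =====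
theorem format_skill_name_py_spec : Claim_unchanged_format_skill_name_py := by
  unfold Claim_unchanged_format_skill_name_py Spec_format_skill_name_py
  intro keyword _ hnd
  have hwords : ∀ w ∈ PySem.Str.split₀ keyword, ∀ p ∈ pvCascades,
      PySem.Chars.startswith (PySem.Chars.lower w.toList) p = false := by
    intro w hw p hp
    unfold D_format_skill_name_py at hnd
    rw [Bool.not_eq_true, List.any_eq_false] at hnd
    have hD' := hnd w hw
    rw [Bool.not_eq_true, List.any_eq_false] at hD'
    have key : ∀ q : String, PySem.Str.startswith (PySem.Str.lower w) q = false →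
        PySem.Chars.startswith (PySem.Chars.lower w.toList) q.toList = false := by
      intro q h; simpa using h
    simp only [pvCascades, List.mem_cons, List.not_mem_nil, or_false] at hp
    rcases hp with rfl | rfl | rfl | rfl | rfl | rfl
    · exact key "sap2p" (by simpa using hD' "sap2p" (by simp))
    · exact key "erp2p" (by simpa using hD' "erp2p" (by simp))
    · exact key "rfp2p" (by simpa using hD' "rfp2p" (by simp))
    · exact key "rfqa" (by simpa using hD' "rfqa" (by simp))
    · exact key "rfqc" (by simpa using hD' "rfqc" (by simp))
    · exact key "jitco" (by simpa using hD' "jitco" (by simp))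
  refine String.toList_inj.mp ?_
  rw [pvA_toList, pvB_toList]
  refine congrArg (PySem.Chars.join [' ']) (List.map_congr_left ?_)
  intro w hw
  exact pvWord w.toList (hwords w hw)

set_option maxRecDepth 8192 in
theorem format_skill_name_py_changed : Claim_changed_format_skill_name_py := by
  unfold Claim_changed_format_skill_name_py
  refine ⟨by decide, by decide, by decide, by decide, by decide⟩

theorem format_skill_name_py_tight : Claim_exact_format_skill_name_py := by
  unfold Claim_exact_format_skill_name_py
  intro keyword _ hd hEq
  have hjoin : PySem.Chars.join [' ']
        ((PySem.Str.split₀ keyword).map (fun w => pvChain (pyCapChars w.toList)))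
      = PySem.Chars.join [' ']
        ((PySem.Str.split₀ keyword).map (fun w => bFormatWord w.toList)) := by
    rw [← pvA_toList, ← pvB_toList, hEq]
  have hF : List.Forall₂ (fun a b : List Char => a.length = b.length)
      ((PySem.Str.split₀ keyword).map (fun w => pvChain (pyCapChars w.toList)))
      ((PySem.Str.split₀ keyword).map (fun w => bFormatWord w.toList)) := by
    induction PySem.Str.split₀ keyword with
    | nil => exact List.Forall₂.nil
    | cons a l ih => exact List.Forall₂.cons (pvWordLen a.toList) ih
  have hmap := pvJoin_inj _ _ hF hjoin
  unfold D_format_skill_name_py at hd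
  rw [List.any_eq_true] at hd
  obtain ⟨w, hw, hwp⟩ := hd
  rw [List.any_eq_true] at hwp
  obtain ⟨p, hp, hst⟩ := hwp
  have hww : pvChain (pyCapChars w.toList) = bFormatWord w.toList :=
    List.map_inj_left.mp hmap w hw
  have hst' : PySem.Chars.startswith (PySem.Chars.lower w.toList) p.toList = true := by
    simpa using hst
  rw [PySem.Chars.startswith] at hst'
  simp only [List.mem_cons, List.not_mem_nil, or_false] at hp
  rcases hp with rfl | rfl | rfl | rfl | rfl | rfl
  · -- p = "sap2p"
    cases hwl : w.toList with
    | nil =>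
      rw [hwl] at hst'
      exact absurd hst' (by decide)
    | cons c t =>
      rw [hwl] at hst' hww
      have hst2 : ['s','a','p','2','p'].isPrefixOf (PySem.Chars.lowerChar c :: PySem.Chars.lower t) = true := by
        have hts : ("sap2p" : String).toList = ['s','a','p','2','p'] := rfl
        have hcons : PySem.Chars.lower (c :: t) = PySem.Chars.lowerChar c :: PySem.Chars.lower t := rfl
        rw [hts, hcons] at hst'
        exact hst'
      rw [List.isPrefixOf_iff_prefix, List.cons_prefix_cons] at hst2
      obtain ⟨hlc, hpre⟩ := hst2
      obtain ⟨rest, hr⟩ := hpre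
      have hrest : ∀ x ∈ rest, PySem.Chars.isupper x = false := by
        intro x hx
        have hxm : x ∈ PySem.Chars.lower t := by rw [← hr]; exact List.mem_append_right _ hx
        rw [PySem.Chars.lower] at hxm
        obtain ⟨y, _, rfl⟩ := List.mem_map.mp hxm
        exact isupper_lowerChar y
      have hup : PySem.Chars.upperChar c = 'S' :=
        upperChar_of_lowerChar c 's' 'S' (by decide) (by decide) hlc.symm
      have hcap : pyCapChars (c :: t) = 'S' :: 'a' :: 'p' :: '2' :: 'p' :: rest := by
        rw [show pyCapChars (c :: t) = PySem.Chars.upperChar c :: PySem.Chars.lower t from rfl,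
            hup, ← hr]
        rfl
      have hB : bFormatWord (c :: t) = bKeyLoop ('S' :: 'a' :: 'p' :: '2' :: 'p' :: rest) bTable := by
        rw [bFormatWord]
        have hcd : PySem.Chars.upper ((c :: t).take 1) ++ PySem.Chars.lower ((c :: t).drop 1)
            = PySem.Chars.upperChar c :: PySem.Chars.lower t := by
          simp [PySem.Chars.upper, PySem.Chars.lower]
        rw [hcd, hup, ← hr]
        rfl
      rw [hcap, hB] at hww
      exact pvDiff_Sap rest hrest hww
  · -- p = "erp2p"
    cases hwl : w.toList with
    | nil =>
      rw [hwl] at hst'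
      exact absurd hst' (by decide)
    | cons c t =>
      rw [hwl] at hst' hww
      have hst2 : ['e','r','p','2','p'].isPrefixOf (PySem.Chars.lowerChar c :: PySem.Chars.lower t) = true := by
        have hts : ("erp2p" : String).toList = ['e','r','p','2','p'] := rfl
        have hcons : PySem.Chars.lower (c :: t) = PySem.Chars.lowerChar c :: PySem.Chars.lower t := rfl
        rw [hts, hcons] at hst'
        exact hst'
      rw [List.isPrefixOf_iff_prefix, List.cons_prefix_cons] at hst2
      obtain ⟨hlc, hpre⟩ := hst2
      obtain ⟨rest, hr⟩ := hpre
      have hrest : ∀ x ∈ rest, PySem.Chars.isupper x = false := by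
        intro x hx
        have hxm : x ∈ PySem.Chars.lower t := by rw [← hr]; exact List.mem_append_right _ hx
        rw [PySem.Chars.lower] at hxm
        obtain ⟨y, _, rfl⟩ := List.mem_map.mp hxm
        exact isupper_lowerChar y
      have hup : PySem.Chars.upperChar c = 'E' :=
        upperChar_of_lowerChar c 'e' 'E' (by decide) (by decide) hlc.symm
      have hcap : pyCapChars (c :: t) = 'E' :: 'r' :: 'p' :: '2' :: 'p' :: rest := by
        rw [show pyCapChars (c :: t) = PySem.Chars.upperChar c :: PySem.Chars.lower t from rfl,
            hup, ← hr]
        rfl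
      have hB : bFormatWord (c :: t) = bKeyLoop ('E' :: 'r' :: 'p' :: '2' :: 'p' :: rest) bTable := by
        rw [bFormatWord]
        have hcd : PySem.Chars.upper ((c :: t).take 1) ++ PySem.Chars.lower ((c :: t).drop 1)
            = PySem.Chars.upperChar c :: PySem.Chars.lower t := by
          simp [PySem.Chars.upper, PySem.Chars.lower]
        rw [hcd, hup, ← hr]
        rfl
      rw [hcap, hB] at hww
      exact pvDiff_Erp rest hrest hww
  · -- p = "rfp2p"
    cases hwl : w.toList with
    | nil =>
      rw [hwl] at hst'
      exact absurd hst' (by decide)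
    | cons c t =>
      rw [hwl] at hst' hww
      have hst2 : ['r','f','p','2','p'].isPrefixOf (PySem.Chars.lowerChar c :: PySem.Chars.lower t) = true := by
        have hts : ("rfp2p" : String).toList = ['r','f','p','2','p'] := rfl
        have hcons : PySem.Chars.lower (c :: t) = PySem.Chars.lowerChar c :: PySem.Chars.lower t := rfl
        rw [hts, hcons] at hst'
        exact hst'
      rw [List.isPrefixOf_iff_prefix, List.cons_prefix_cons] at hst2
      obtain ⟨hlc, hpre⟩ := hst2
      obtain ⟨rest, hr⟩ := hpre
      have hrest : ∀ x ∈ rest, PySem.Chars.isupper x = false := by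
        intro x hx
        have hxm : x ∈ PySem.Chars.lower t := by rw [← hr]; exact List.mem_append_right _ hx
        rw [PySem.Chars.lower] at hxm
        obtain ⟨y, _, rfl⟩ := List.mem_map.mp hxm
        exact isupper_lowerChar y
      have hup : PySem.Chars.upperChar c = 'R' :=
        upperChar_of_lowerChar c 'r' 'R' (by decide) (by decide) hlc.symm
      have hcap : pyCapChars (c :: t) = 'R' :: 'f' :: 'p' :: '2' :: 'p' :: rest := by
        rw [show pyCapChars (c :: t) = PySem.Chars.upperChar c :: PySem.Chars.lower t from rfl,
            hup, ← hr]
        rfl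
      have hB : bFormatWord (c :: t) = bKeyLoop ('R' :: 'f' :: 'p' :: '2' :: 'p' :: rest) bTable := by
        rw [bFormatWord]
        have hcd : PySem.Chars.upper ((c :: t).take 1) ++ PySem.Chars.lower ((c :: t).drop 1)
            = PySem.Chars.upperChar c :: PySem.Chars.lower t := by
          simp [PySem.Chars.upper, PySem.Chars.lower]
        rw [hcd, hup, ← hr]
        rfl
      rw [hcap, hB] at hww
      exact pvDiff_Rfp rest hrest hww
  · -- p = "rfqa"
    cases hwl : w.toList with
    | nil =>
      rw [hwl] at hst'
      exact absurd hst' (by decide)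
    | cons c t =>
      rw [hwl] at hst' hww
      have hst2 : ['r','f','q','a'].isPrefixOf (PySem.Chars.lowerChar c :: PySem.Chars.lower t) = true := by
        have hts : ("rfqa" : String).toList = ['r','f','q','a'] := rfl
        have hcons : PySem.Chars.lower (c :: t) = PySem.Chars.lowerChar c :: PySem.Chars.lower t := rfl
        rw [hts, hcons] at hst'
        exact hst'
      rw [List.isPrefixOf_iff_prefix, List.cons_prefix_cons] at hst2
      obtain ⟨hlc, hpre⟩ := hst2
      obtain ⟨rest, hr⟩ := hpre
      have hrest : ∀ x ∈ rest, PySem.Chars.isupper x = false := by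
        intro x hx
        have hxm : x ∈ PySem.Chars.lower t := by rw [← hr]; exact List.mem_append_right _ hx
        rw [PySem.Chars.lower] at hxm
        obtain ⟨y, _, rfl⟩ := List.mem_map.mp hxm
        exact isupper_lowerChar y
      have hup : PySem.Chars.upperChar c = 'R' :=
        upperChar_of_lowerChar c 'r' 'R' (by decide) (by decide) hlc.symm
      have hcap : pyCapChars (c :: t) = 'R' :: 'f' :: 'q' :: 'a' :: rest := by
        rw [show pyCapChars (c :: t) = PySem.Chars.upperChar c :: PySem.Chars.lower t from rfl,
            hup, ← hr]
        rfl
      have hB : bFormatWord (c :: t) = bKeyLoop ('R' :: 'f' :: 'q' :: 'a' :: rest) bTable := by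
        rw [bFormatWord]
        have hcd : PySem.Chars.upper ((c :: t).take 1) ++ PySem.Chars.lower ((c :: t).drop 1)
            = PySem.Chars.upperChar c :: PySem.Chars.lower t := by
          simp [PySem.Chars.upper, PySem.Chars.lower]
        rw [hcd, hup, ← hr]
        rfl
      rw [hcap, hB] at hww
      exact pvDiff_Rfqa rest hrest hww
  · -- p = "rfqc"
    cases hwl : w.toList with
    | nil =>
      rw [hwl] at hst'
      exact absurd hst' (by decide)
    | cons c t =>
      rw [hwl] at hst' hww
      have hst2 : ['r','f','q','c'].isPrefixOf (PySem.Chars.lowerChar c :: PySem.Chars.lower t) = true := by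
        have hts : ("rfqc" : String).toList = ['r','f','q','c'] := rfl
        have hcons : PySem.Chars.lower (c :: t) = PySem.Chars.lowerChar c :: PySem.Chars.lower t := rfl
        rw [hts, hcons] at hst'
        exact hst'
      rw [List.isPrefixOf_iff_prefix, List.cons_prefix_cons] at hst2
      obtain ⟨hlc, hpre⟩ := hst2
      obtain ⟨rest, hr⟩ := hpre
      have hrest : ∀ x ∈ rest, PySem.Chars.isupper x = false := by
        intro x hx
        have hxm : x ∈ PySem.Chars.lower t := by rw [← hr]; exact List.mem_append_right _ hx
        rw [PySem.Chars.lower] at hxm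
        obtain ⟨y, _, rfl⟩ := List.mem_map.mp hxm
        exact isupper_lowerChar y
      have hup : PySem.Chars.upperChar c = 'R' :=
        upperChar_of_lowerChar c 'r' 'R' (by decide) (by decide) hlc.symm
      have hcap : pyCapChars (c :: t) = 'R' :: 'f' :: 'q' :: 'c' :: rest := by
        rw [show pyCapChars (c :: t) = PySem.Chars.upperChar c :: PySem.Chars.lower t from rfl,
            hup, ← hr]
        rfl
      have hB : bFormatWord (c :: t) = bKeyLoop ('R' :: 'f' :: 'q' :: 'c' :: rest) bTable := by
        rw [bFormatWord]
        have hcd : PySem.Chars.upper ((c :: t).take 1) ++ PySem.Chars.lower ((c :: t).drop 1)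
            = PySem.Chars.upperChar c :: PySem.Chars.lower t := by
          simp [PySem.Chars.upper, PySem.Chars.lower]
        rw [hcd, hup, ← hr]
        rfl
      rw [hcap, hB] at hww
      exact pvDiff_Rfqc rest hrest hww
  · -- p = "jitco"
    cases hwl : w.toList with
    | nil =>
      rw [hwl] at hst'
      exact absurd hst' (by decide)
    | cons c t =>
      rw [hwl] at hst' hww
      have hst2 : ['j','i','t','c','o'].isPrefixOf (PySem.Chars.lowerChar c :: PySem.Chars.lower t) = true := by
        have hts : ("jitco" : String).toList = ['j','i','t','c','o'] := rfl
        have hcons : PySem.Chars.lower (c :: t) = PySem.Chars.lowerChar c :: PySem.Chars.lower t := rfl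
        rw [hts, hcons] at hst'
        exact hst'
      rw [List.isPrefixOf_iff_prefix, List.cons_prefix_cons] at hst2
      obtain ⟨hlc, hpre⟩ := hst2
      obtain ⟨rest, hr⟩ := hpre
      have hrest : ∀ x ∈ rest, PySem.Chars.isupper x = false := by
        intro x hx
        have hxm : x ∈ PySem.Chars.lower t := by rw [← hr]; exact List.mem_append_right _ hx
        rw [PySem.Chars.lower] at hxm
        obtain ⟨y, _, rfl⟩ := List.mem_map.mp hxm
        exact isupper_lowerChar y
      have hup : PySem.Chars.upperChar c = 'J' :=
        upperChar_of_lowerChar c 'j' 'J' (by decide) (by decide) hlc.symm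
      have hcap : pyCapChars (c :: t) = 'J' :: 'i' :: 't' :: 'c' :: 'o' :: rest := by
        rw [show pyCapChars (c :: t) = PySem.Chars.upperChar c :: PySem.Chars.lower t from rfl,
            hup, ← hr]
        rfl
      have hB : bFormatWord (c :: t) = bKeyLoop ('J' :: 'i' :: 't' :: 'c' :: 'o' :: rest) bTable := by
        rw [bFormatWord]
        have hcd : PySem.Chars.upper ((c :: t).take 1) ++ PySem.Chars.lower ((c :: t).drop 1)
            = PySem.Chars.upperChar c :: PySem.Chars.lower t := by
          simp [PySem.Chars.upper, PySem.Chars.lower]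
        rw [hcd, hup, ← hr]
        rfl
      rw [hcap, hB] at hww
      exact pvDiff_Jit rest hrest hww
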